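-- pv_equiv track=rewrite | github.com/Rastaiha/wiki-yar-bot-polling | polling/az_-_Copy.py | get_parent_namespace
-- ===== SOURCE A (Python) =====
-- def get_parent_namespace(namespace):
--     l = namespace.split(':')
--     s = ''
--     for i in range(len(l)-1):
--         if len(s) > 0:
--             s += ':'
--         s += l[i]
--     return s
-- ===== SOURCE B (Python) =====
-- def get_parent_namespace(namespace):
--     return namespace.rpartition(':')[0]
-- ===== Notes on version B (the rewrite author's own statement) =====
-- stated objective: idiomatic
-- what changed: Replaces split-into-all-segments plus a rejoin loop with a single rpartition that scans from the right for the last ':' and returns the prefix before it.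
-- intended difference: On namespaces that start with a colon and contain at least two colons, A's len(s)>0 guard silently drops the leading empty segments and their colons, while B returns the full prefix before the last colon, which is the intended parent namespace. — e.g. on get_parent_namespace(":a:b"): A returns "a", B returns ":a"
import Mathlib
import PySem

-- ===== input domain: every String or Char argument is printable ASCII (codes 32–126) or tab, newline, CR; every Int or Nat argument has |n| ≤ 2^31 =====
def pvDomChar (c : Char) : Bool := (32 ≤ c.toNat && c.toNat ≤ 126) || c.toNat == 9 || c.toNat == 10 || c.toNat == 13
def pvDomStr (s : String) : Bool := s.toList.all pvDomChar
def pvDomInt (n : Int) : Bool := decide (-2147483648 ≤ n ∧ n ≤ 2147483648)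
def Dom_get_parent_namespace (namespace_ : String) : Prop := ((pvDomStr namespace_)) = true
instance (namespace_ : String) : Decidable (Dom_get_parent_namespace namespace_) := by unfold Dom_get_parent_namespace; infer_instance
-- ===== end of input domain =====

-- B replaces A's split-all-then-rejoin loop with one right scan for the last separator (rpartition);
-- on colon-led inputs with at least two colons A drops the leading colons and B keeps the full prefix (see D_ below).

-- ===== PORT A =====
def get_parent_namespace (namespace_ : String) : String :=
  let l := PySem.Chars.splitOn namespace_.toList [':']   -- l = namespace.split(':')
  let s := (PySem.List.pyRange 0 ((l.length : Int) - 1) 1).foldl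
    (fun s i =>
      let s := if 0 < s.length then s ++ [':'] else s    -- if len(s) > 0: s += ':'
      s ++ PySem.List.pyGetD l i [])                     -- s += l[i]  (i always in range)
    ([] : List Char)
  String.ofList s

-- ===== PORT B =====
-- hand port of str.rpartition(':')[0] (not in PySem): scan from the right for the last ':',
-- return the prefix before it, '' if there is none — exact for the one-char separator ':'.
def get_parent_namespace_alt (namespace_ : String) : String :=
  String.ofList (((namespace_.toList.reverse.dropWhile (· ≠ ':')).drop 1).reverse)

-- ===== PRECONDITION & SPEC =====
-- On namespaces starting with a colon that contain at least two colons, A's len(s)>0 guard drops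
-- the leading empty segments and their colons; B returns the full prefix before the last colon,
-- the intended parent namespace.
def D_get_parent_namespace (namespace_ : String) : Prop :=
  namespace_.toList.head? = some ':' ∧ 2 ≤ namespace_.toList.count ':'
instance (namespace_ : String) : Decidable (D_get_parent_namespace namespace_) := by
  unfold D_get_parent_namespace; infer_instance

def Spec_get_parent_namespace (namespace_ : String) (out : String) : Prop :=
  ¬ D_get_parent_namespace namespace_ → out = get_parent_namespace_alt namespace_
instance (namespace_ : String) (out : String) : Decidable (Spec_get_parent_namespace namespace_ out) := by
  unfold Spec_get_parent_namespace; infer_instance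

def pvDiffWitness_get_parent_namespace : String := ":a:b"
def pvDiffWitnessOut_get_parent_namespace : String × String := ("a", ":a")

-- ===== CLAIM (what is proved, stated in full; the proofs are below) =====
def Claim_unchanged_get_parent_namespace : Prop := ∀ (namespace_ : String), Dom_get_parent_namespace namespace_ → Spec_get_parent_namespace namespace_ (get_parent_namespace namespace_)
def Claim_changed_get_parent_namespace : Prop := Dom_get_parent_namespace (pvDiffWitness_get_parent_namespace) ∧ D_get_parent_namespace (pvDiffWitness_get_parent_namespace) ∧ get_parent_namespace (pvDiffWitness_get_parent_namespace) = pvDiffWitnessOut_get_parent_namespace.1 ∧ get_parent_namespace_alt (pvDiffWitness_get_parent_namespace) = pvDiffWitnessOut_get_parent_namespace.2 ∧ pvDiffWitnessOut_get_parent_namespace.1 ≠ pvDiffWitnessOut_get_parent_namespace.2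
def Claim_exact_get_parent_namespace : Prop := ∀ (namespace_ : String), Dom_get_parent_namespace namespace_ → D_get_parent_namespace namespace_ → get_parent_namespace namespace_ ≠ get_parent_namespace_alt namespace_

-- ===== LEMMAS AND PROOFS =====

-- a simple left-recursion characterisation of split(':')
def splitC : List Char → List (List Char)
  | [] => [[]]
  | c :: rest => if c = ':' then [] :: splitC rest else (splitC rest).modifyHead (c :: ·)

-- join-with-':' of a list of segments
def joinC : List (List Char) → List Char
  | [] => []
  | x :: xs => x ++ xs.flatMap (fun seg => ':' :: seg)

theorem splitC_ne_nil (cs : List Char) : splitC cs ≠ [] := by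
  induction cs with
  | nil => simp [splitC]
  | cons c rest ih =>
    simp only [splitC]
    split
    · simp
    · cases h : splitC rest with
      | nil => exact absurd h ih
      | cons x xs => simp [List.modifyHead]

theorem go_eq (fuel : Nat) : ∀ (l cur : List Char) (acc : List (List Char)),
    l.length ≤ fuel →
    PySem.Chars.splitOn.go [':'] fuel l cur acc
      = acc.reverse ++ (splitC l).modifyHead (cur.reverse ++ ·) := by
  induction fuel with
  | zero =>
    intro l cur acc h
    have : l = [] := by cases l <;> simp_all
    subst this
    simp [PySem.Chars.splitOn.go, splitC]
  | succ n ih =>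
    intro l cur acc h
    cases l with
    | nil => simp [PySem.Chars.splitOn.go, splitC]
    | cons c rest =>
      by_cases hc : c = ':'
      · subst hc
        rw [show PySem.Chars.splitOn.go [':'] (n+1) (':' :: rest) cur acc
              = PySem.Chars.splitOn.go [':'] n rest [] (cur.reverse :: acc) by
            simp [PySem.Chars.splitOn.go, List.isPrefixOf]]
        rw [ih rest [] (cur.reverse :: acc) (by simpa using Nat.le_of_succ_le_succ h)]
        cases hs : splitC rest with
        | nil => exact absurd hs (splitC_ne_nil rest)
        | cons x xs => simp [splitC, hs, List.modifyHead]
      · rw [show PySem.Chars.splitOn.go [':'] (n+1) (c :: rest) cur acc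
              = PySem.Chars.splitOn.go [':'] n rest (c :: cur) acc by
            simp [PySem.Chars.splitOn.go, List.isPrefixOf] <;>
              exact fun h' => absurd h'.symm hc]
        rw [ih rest (c :: cur) acc (by simpa using Nat.le_of_succ_le_succ h)]
        cases hs : splitC rest with
        | nil => exact absurd hs (splitC_ne_nil rest)
        | cons x xs => simp [splitC, hs, hc, List.modifyHead]

theorem splitOn_eq_splitC (cs : List Char) :
    PySem.Chars.splitOn cs [':'] = splitC cs := by
  have := go_eq (cs.length + 1) cs [] [] (by omega)
  simp only [PySem.Chars.splitOn]
  rw [this]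
  cases hs : splitC cs with
  | nil => exact absurd hs (splitC_ne_nil cs)
  | cons x xs => simp [List.modifyHead]

-- A's loop body
def stepA (s seg : List Char) : List Char :=
  (if 0 < s.length then s ++ [':'] else s) ++ seg

theorem foldl_stepA_ne_nil (t : List (List Char)) : ∀ (s : List Char), s ≠ [] →
    t.foldl stepA s = s ++ t.flatMap (fun seg => ':' :: seg) := by
  induction t with
  | nil => intro s _; simp
  | cons x xs ih =>
    intro s hs
    have hlen : 0 < s.length := List.length_pos_iff.mpr hs
    simp only [List.foldl_cons, List.flatMap_cons]
    rw [ih (stepA s x) (by simp [stepA, hlen])]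
    simp [stepA, hlen]

theorem foldl_stepA_eq (segs : List (List Char)) :
    segs.foldl stepA [] = joinC (segs.dropWhile (· = [])) := by
  induction segs with
  | nil => simp [joinC]
  | cons x xs ih =>
    by_cases hx : x = []
    · subst hx
      simpa [stepA, List.dropWhile] using ih
    · have h0 : stepA [] x = x := by simp [stepA]
      simp only [List.foldl_cons, h0]
      rw [foldl_stepA_ne_nil xs x hx]
      simp [List.dropWhile, hx, joinC]

-- replace the last segment's extension by its own recursion
def modLastA : List (List Char) → Char → List (List Char)
  | [], _ => []
  | [x], c => [x ++ [c]]
  | x :: y :: t, c => x :: modLastA (y :: t) c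

theorem modLastA_ne_nil {u : List (List Char)} (c : Char) (hu : u ≠ []) : modLastA u c ≠ [] := by
  cases u with
  | nil => exact absurd rfl hu
  | cons x xs => cases xs <;> simp [modLastA]

theorem dropLast_modLastA (u : List (List Char)) (c : Char) :
    (modLastA u c).dropLast = u.dropLast := by
  induction u with
  | nil => simp [modLastA]
  | cons x xs ih =>
    cases xs with
    | nil => simp [modLastA]
    | cons y t =>
      have h1 : modLastA (y :: t) c ≠ [] := modLastA_ne_nil c (by simp)
      cases hm : modLastA (y :: t) c with
      | nil => exact absurd hm h1
      | cons z zs =>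
        simp only [modLastA, hm, List.dropLast_cons₂]
        rw [← hm, ih]

-- splitting at the right end
theorem splitC_append_single (ds : List Char) (c : Char) :
    splitC (ds ++ [c]) =
      if c = ':' then splitC ds ++ [[]] else modLastA (splitC ds) c := by
  induction ds with
  | nil =>
    by_cases hc : c = ':' <;> simp [splitC, hc, modLastA]
  | cons d rest ih =>
    have hne := splitC_ne_nil rest
    by_cases hc : c = ':'
    · subst hc
      by_cases hd : d = ':'
      · simp [splitC, hd, ih]
      · simp only [List.cons_append, splitC, if_neg hd, ih]
        simp only [if_true, eq_self_iff_true]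
        cases hs : splitC rest with
        | nil => exact absurd hs hne
        | cons x xs => simp [List.modifyHead]
    · by_cases hd : d = ':'
      · subst hd
        simp only [List.cons_append, splitC, ih, if_neg hc]
        simp only [if_true, eq_self_iff_true]
        cases hs : splitC rest with
        | nil => exact absurd hs hne
        | cons x xs => simp [modLastA]
      · simp only [List.cons_append, splitC, if_neg hd, ih, if_neg hc]
        cases hs : splitC rest with
        | nil => exact absurd hs hne
        | cons x xs =>
          cases xs with
          | nil => simp [modLastA, List.modifyHead]
          | cons y ys => simp [modLastA, List.modifyHead]

theorem flatMap_colon_ne_nil {u : List (List Char)} (hu : u ≠ []) :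
    u.flatMap (fun seg => ':' :: seg) = ':' :: joinC u := by
  cases u with
  | nil => exact absurd rfl hu
  | cons x xs => simp [joinC]

theorem joinC_splitC (ds : List Char) : joinC (splitC ds) = ds := by
  induction ds with
  | nil => simp [splitC, joinC]
  | cons c rest ih =>
    have hne := splitC_ne_nil rest
    by_cases hc : c = ':'
    · subst hc
      simp only [splitC, if_pos rfl]
      show joinC ([] :: splitC rest) = ':' :: rest
      rw [show joinC ([] :: splitC rest)
            = [] ++ (splitC rest).flatMap (fun seg => ':' :: seg) from rfl]
      rw [List.nil_append, flatMap_colon_ne_nil hne, ih]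
    · simp only [splitC, if_neg hc]
      cases hs : splitC rest with
      | nil => exact absurd hs hne
      | cons x xs =>
        rw [hs] at ih
        simp [List.modifyHead, joinC] at ih ⊢
        simpa [joinC] using ih

-- B's right scan computes join of all segments but the last
theorem rscan_eq (cs : List Char) :
    ((cs.reverse.dropWhile (· ≠ ':')).drop 1).reverse = joinC ((splitC cs).dropLast) := by
  induction cs using List.reverseRecOn with
  | nil => simp [splitC, joinC]
  | append_singleton ds c ih =>
    by_cases hc : c = ':'
    · subst hc
      rw [splitC_append_single, if_pos rfl]
      simp [List.dropWhile, List.dropLast_concat, joinC_splitC]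
    · rw [splitC_append_single, if_neg hc, dropLast_modLastA]
      have h1 : ((ds ++ [c]).reverse.dropWhile (· ≠ ':')) = ds.reverse.dropWhile (· ≠ ':') := by
        simp [List.dropWhile, hc]
      rw [h1, ih]

-- A as a function of splitC
theorem portA_eq (namespace_ : String) :
    get_parent_namespace namespace_
      = String.ofList (joinC (((splitC namespace_.toList).dropLast).dropWhile (· = []))) := by
  unfold get_parent_namespace
  show String.ofList
      ((PySem.List.pyRange 0 (((PySem.Chars.splitOn namespace_.toList [':']).length : Int) - 1) 1).foldl
        (fun s i => (if 0 < s.length then s ++ [':'] else s)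
            ++ PySem.List.pyGetD (PySem.Chars.splitOn namespace_.toList [':']) i []) [])
    = _
  rw [splitOn_eq_splitC]
  have hne := splitC_ne_nil namespace_.toList
  generalize hl : splitC namespace_.toList = l
  rw [hl] at hne
  have hlen : (l.length : Int) - 1 = ((l.dropLast.length : Nat) : Int) := by
    have : 1 ≤ l.length := List.length_pos_iff.mpr hne
    simp [List.length_dropLast]
    omega
  have hcongr :
      (PySem.List.pyRange 0 ((l.length : Int) - 1) 1).foldl
        (fun s i => (if 0 < s.length then s ++ [':'] else s) ++ PySem.List.pyGetD l i []) []
      = (PySem.List.pyRange 0 ((l.dropLast.length : Nat) : Int) 1).foldl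
        (fun s i => (if 0 < s.length then s ++ [':'] else s) ++ PySem.List.pyGetD l.dropLast i []) [] := by
    rw [hlen]
    apply PySem.List.foldl_congr_mem
    intro s i hi
    have hmem := (PySem.List.mem_pyRange_one).mp hi
    have h0 : 0 ≤ i := hmem.1
    have h1 : i < ((l.dropLast.length : Nat) : Int) := hmem.2
    have h1' : i.toNat < l.dropLast.length := by omega
    have h1'' : i.toNat < l.length := by
      have := l.length_dropLast
      omega
    rw [PySem.List.pyGetD_eq_getElem l [] h0 (by omega),
        PySem.List.pyGetD_eq_getElem l.dropLast [] h0 (by omega)]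
    simp [List.getElem_dropLast]
  rw [hcongr]
  have hfold := PySem.List.foldl_pyRange_zero_pyGetD' l.dropLast ([] : List Char) stepA ([] : List Char)
  simp only [stepA] at hfold
  rw [hfold, foldl_stepA_eq]

theorem portB_eq (namespace_ : String) :
    get_parent_namespace_alt namespace_
      = String.ofList (joinC ((splitC namespace_.toList).dropLast)) := by
  unfold get_parent_namespace_alt
  rw [rscan_eq]

theorem splitC_of_not_mem {cs : List Char} (h : ':' ∉ cs) : splitC cs = [cs] := by
  induction cs with
  | nil => simp [splitC]
  | cons c rest ih =>
    have hc : c ≠ ':' := fun hcc => h (hcc ▸ List.mem_cons_self)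
    have hr : ':' ∉ rest := fun hm => h (List.mem_cons_of_mem _ hm)
    simp [splitC, hc, ih hr, List.modifyHead]

theorem splitC_two_le {cs : List Char} (h : ':' ∈ cs) : 2 ≤ (splitC cs).length := by
  induction cs with
  | nil => simp at h
  | cons c rest ih =>
    by_cases hc : c = ':'
    · subst hc
      have : 1 ≤ (splitC rest).length :=
        List.length_pos_iff.mpr (splitC_ne_nil rest)
      simp [splitC]; omega
    · have hr : ':' ∈ rest := by
        rcases List.mem_cons.mp h with h1 | h1
        · exact absurd h1.symm hc
        · exact h1
      have := ih hr
      simp only [splitC, if_neg hc]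
      rw [List.length_modifyHead]
      omega

theorem splitC_no_colon {cs : List Char} : ∀ seg ∈ splitC cs, ':' ∉ seg := by
  induction cs with
  | nil => simp [splitC]
  | cons c rest ih =>
    by_cases hc : c = ':'
    · subst hc
      simp only [splitC, if_pos rfl]
      intro seg hseg
      rcases List.mem_cons.mp hseg with h1 | h1
      · subst h1; simp
      · exact ih seg h1
    · simp only [splitC, if_neg hc]
      cases hs : splitC rest with
      | nil => exact absurd hs (splitC_ne_nil rest)
      | cons x xs =>
        intro seg hseg
        rcases List.mem_cons.mp (by simpa [List.modifyHead] using hseg) with h1 | h1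
        · subst h1
          intro hmem
          rcases List.mem_cons.mp hmem with h2 | h2
          · exact hc h2.symm
          · exact (ih x (hs ▸ List.mem_cons_self)) h2
        · exact ih seg (hs ▸ List.mem_cons_of_mem _ h1)

-- ===== VERDICT =====

theorem get_parent_namespace_spec : Claim_unchanged_get_parent_namespace := by
  intro namespace_ _ hnD
  show get_parent_namespace namespace_ = get_parent_namespace_alt namespace_
  rw [portA_eq, portB_eq]
  cases hcs : namespace_.toList with
  | nil => simp [splitC, joinC]
  | cons c rest =>
    by_cases hc : c = ':'
    · subst hc
      have hcnt : (namespace_.toList).count ':' < 2 := by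
        by_contra hge
        exact hnD ⟨by simp [hcs], by omega⟩
      rw [hcs] at hcnt
      have hrest : ':' ∉ rest := by
        have : rest.count ':' = 0 := by
          simp [List.count_cons] at hcnt
          omega
        exact (List.count_eq_zero).mp this
      simp [splitC, splitC_of_not_mem hrest, joinC, List.dropWhile]
    · simp only [splitC, if_neg hc]
      cases hs : splitC rest with
      | nil => exact absurd hs (splitC_ne_nil rest)
      | cons x xs =>
        cases xs with
        | nil => simp [List.modifyHead, joinC]
        | cons y ys =>
          simp [List.modifyHead, List.dropLast, List.dropWhile]

theorem get_parent_namespace_changed : Claim_changed_get_parent_namespace := by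
  unfold Claim_changed_get_parent_namespace; decide

theorem get_parent_namespace_tight : Claim_exact_get_parent_namespace := by
  intro namespace_ _ hD heq
  obtain ⟨hhead, hcnt⟩ := hD
  cases hcs : namespace_.toList with
  | nil => rw [hcs] at hhead; simp at hhead
  | cons c rest =>
    rw [hcs] at hhead hcnt
    have hc : c = ':' := by simpa using hhead
    subst hc
    have hrest : ':' ∈ rest := by
      by_contra hnm
      have := (List.count_eq_zero).mpr hnm
      simp [List.count_cons, this] at hcnt
    rw [portA_eq, portB_eq, hcs] at heq
    have h2 : 2 ≤ (splitC rest).length := splitC_two_le hrest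
    cases hs : splitC rest with
    | nil => exact absurd hs (splitC_ne_nil rest)
    | cons x xs =>
      cases xs with
      | nil => rw [hs] at h2; simp at h2
      | cons y ys =>
        rw [show splitC (':' :: rest) = [] :: splitC rest from by simp [splitC], hs] at heq
        -- B side: dropLast ([] :: x :: y :: ys) = [] :: dropLast (x :: y :: ys), nonempty tail
        simp only [List.dropLast_cons₂] at heq
        -- left side after dropWhile removes the leading []
        rw [show List.dropWhile (fun x => decide (x = [])) (([] : List Char) :: x :: (y :: ys).dropLast)
              = List.dropWhile (fun x => decide (x = [])) (x :: (y :: ys).dropLast) from by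
            rw [List.dropWhile_cons]; simp] at heq
        -- compare first characters
        have hBchars : joinC ([] :: (x :: (y :: ys).dropLast))
            = ':' :: joinC (x :: (y :: ys).dropLast) := by
          simp [joinC, flatMap_colon_ne_nil (by simp : (x :: (y :: ys).dropLast) ≠ [])]
        rw [hBchars] at heq
        have hlist : joinC (((x :: (y :: ys).dropLast)).dropWhile (fun x => decide (x = [])))
            = ':' :: joinC (x :: (y :: ys).dropLast) := String.ofList_inj.mp heq
        -- the left side never starts with ':'
        cases hdw : ((x :: (y :: ys).dropLast)).dropWhile (· = []) with
        | nil => rw [hdw] at hlist; simp [joinC] at hlist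
        | cons z zs =>
          have hzne : z ≠ [] := by
            have := List.head?_dropWhile_not (p := fun s => s = []) (l := x :: (y :: ys).dropLast)
            rw [hdw] at this
            simpa using this
          have hzmem : z ∈ splitC rest := by
            have hz' : z ∈ (x :: (y :: ys).dropLast).dropWhile (· = []) := by
              rw [hdw]; exact List.mem_cons_self
            have hz'' : z ∈ x :: (y :: ys).dropLast := List.dropWhile_subset _ hz'
            rw [hs]
            rcases List.mem_cons.mp hz'' with h1 | h1
            · exact h1 ▸ List.mem_cons_self
            · exact List.mem_cons_of_mem _ (List.dropLast_subset _ h1)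
          have hzc : ':' ∉ z := splitC_no_colon z hzmem
          rw [hdw] at hlist
          cases z with
          | nil => exact hzne rfl
          | cons a as =>
            simp [joinC] at hlist
            exact hzc (hlist.1 ▸ List.mem_cons_self)
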